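-- pv_equiv track=rewrite | github.com/JavierBenitez112/Lab--08 | ejercicio2.py | function_ejercicio2
-- ===== SOURCE A (Python) =====
-- def function_ejercicio2(n):
--     """
--     Implementación del algoritmo del ejercicio 2
--     void function (int n) {
--         if (n <= 1) return;
--         int i, j;
--         for (i = 1; i <= n; i++) {
--             for (j = 1; j <= n; j++) {
--                 printf ("Sequence\n");
--                 break;
--             }
--         }
--     }
--     """
--     if n <= 1:
--         return 0
--
--     counter = 0
--     for i in range(1, n + 1):
--         for j in range(1, n + 1):
--             # Simulamos el printf("Sequence\n")
--             counter += 1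
--             break  # El break hace que solo se ejecute una vez por cada i
--     return counter
-- ===== SOURCE B (Python) =====
-- def function_ejercicio2(n):
--     # Closed form: the outer loop runs n times (inner loop breaks immediately),
--     # so the counter is exactly n for n > 1, else 0.
--     return n if n > 1 else 0
-- ===== Notes on version B (the rewrite author's own statement) =====
-- stated objective: faster
-- what changed: Replaced the nested loop counter (inner loop breaks after one pass, outer loop runs n times) with the closed form n for n>1, else 0.
import Mathlib
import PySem

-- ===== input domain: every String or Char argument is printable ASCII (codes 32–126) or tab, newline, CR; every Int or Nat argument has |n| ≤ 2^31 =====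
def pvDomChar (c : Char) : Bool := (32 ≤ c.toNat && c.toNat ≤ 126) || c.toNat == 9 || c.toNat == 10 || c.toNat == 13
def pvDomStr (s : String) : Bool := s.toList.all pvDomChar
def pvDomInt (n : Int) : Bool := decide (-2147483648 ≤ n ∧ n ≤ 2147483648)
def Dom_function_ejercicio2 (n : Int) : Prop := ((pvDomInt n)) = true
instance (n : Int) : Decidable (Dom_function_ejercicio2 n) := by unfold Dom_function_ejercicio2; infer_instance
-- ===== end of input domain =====

-- B replaces A's nested loops (inner loop breaks immediately) with the closed form n if n>1 else 0; faster (O(1) vs O(n)).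


-- ===== PORT A =====
-- the inner 'for j in range(1, n+1): counter += 1; break' adds 1 iff the inner range is nonempty
def function_ejercicio2 (n : Int) : Int :=
  if n ≤ 1 then 0
  else
    let inner := PySem.List.pyRange 1 (n + 1) 1   -- range(1, n+1) of the inner loop
    (PySem.List.pyRange 1 (n + 1) 1).foldl
      (fun counter _i =>
        match inner with
        | [] => counter
        | _ :: _ => counter + 1)
      0

-- ===== PORT B =====
def function_ejercicio2_alt (n : Int) : Int :=
  if n > 1 then n else 0

-- ===== PRECONDITION & SPEC =====
def Spec_function_ejercicio2 (n : Int) (out : Int) : Prop := out = function_ejercicio2_alt n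
instance (n : Int) (out : Int) : Decidable (Spec_function_ejercicio2 n out) := by unfold Spec_function_ejercicio2; infer_instance

-- ===== CLAIM (what is proved, stated in full; the proofs are below) =====
def Claim_equal_function_ejercicio2 : Prop := ∀ (n : Int), Dom_function_ejercicio2 n → Spec_function_ejercicio2 n (function_ejercicio2 n)

-- ===== LEMMAS AND PROOFS =====
theorem foldl_count_aux (l : List Int) (f : Int → Int → Int)
    (hf : ∀ c i, f c i = c + 1) (c : Int) :
    l.foldl f c = c + l.length := by
  induction l generalizing c with
  | nil => simp
  | cons a t ih => simp [List.foldl, hf, ih, List.length_cons]; ring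

-- ===== VERDICT (by name: the statement is the Claim_ definition above) =====
theorem function_ejercicio2_spec : Claim_equal_function_ejercicio2 := by
  intro n _
  unfold Spec_function_ejercicio2 function_ejercicio2 function_ejercicio2_alt
  by_cases h : n ≤ 1
  · simp [h, show ¬ n > 1 by omega]
  · have hne : PySem.List.pyRange 1 (n + 1) 1 ≠ [] := by
      have : (1 : Int) ∈ PySem.List.pyRange 1 (n + 1) 1 := by
        rw [PySem.List.mem_pyRange_one]; omega
      intro he; rw [he] at this; simp at this
    simp only [h, if_false, show n > 1 by omega, if_true]
    rw [foldl_count_aux]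
    · rw [PySem.List.length_pyRange_one]; omega
    · intro c i
      cases hr : PySem.List.pyRange 1 (n + 1) 1 with
      | nil => exact absurd hr hne
      | cons a t => rfl
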